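-- pv_equiv track=rewrite | github.com/adwaghvjti/DevOps_practical | app.py | longest_increasing_decreasing_subarray
-- ===== SOURCE A (Python) =====
-- def longest_increasing_decreasing_subarray(arr):
--     if not arr:
--         return 0, []
--
--     n = len(arr)
--     max_length = 1
--     inc_length = 1
--     dec_length = 1
--     start_index = 0
--     max_start_index = 0
--     is_increasing = True
--
--     for i in range(1, n):
--         if arr[i] > arr[i - 1]:
--             inc_length += 1
--             dec_length = 1
--             if inc_length == 2:
--                 start_index = i - 1
--             if inc_length > max_length:
--                 max_length = inc_length
--                 max_start_index = start_index
--                 is_increasing = True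
--         elif arr[i] < arr[i - 1]:
--             dec_length += 1
--             inc_length = 1
--             if dec_length == 2:
--                 start_index = i - 1
--             if dec_length > max_length:
--                 max_length = dec_length
--                 max_start_index = start_index
--                 is_increasing = False
--         else:
--             inc_length = 1
--             dec_length = 1
--
--     longest_subarray = arr[max_start_index:max_start_index + max_length]
--     return max_length, longest_subarray
-- ===== SOURCE B (Python) =====
-- def longest_increasing_decreasing_subarray(arr):
--     if not arr:
--         return 0, []
--     n = len(arr)
--     best_len = 1
--     best_start = 0
--     i = 1
--     while i < n:
--         s = (arr[i] > arr[i - 1]) - (arr[i] < arr[i - 1])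
--         if s == 0:
--             i += 1
--             continue
--         j = i
--         while j + 1 < n and ((arr[j + 1] > arr[j]) - (arr[j + 1] < arr[j])) == s:
--             j += 1
--         run_len = j - i + 2
--         if run_len > best_len:
--             best_len = run_len
--             best_start = i - 1
--         i = j + 1
--     return best_len, arr[best_start:best_start + best_len]
-- ===== Notes on version B (the rewrite author's own statement) =====
-- stated objective: alternative
-- what changed: A updates per-element increasing/decreasing counters with tie-breaking bookkeeping at every index; B builds the sign of each consecutive difference and scans whole equal-sign runs with a nested while loop, comparing one candidate (start, length) per run against the best.
import Mathlib
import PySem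

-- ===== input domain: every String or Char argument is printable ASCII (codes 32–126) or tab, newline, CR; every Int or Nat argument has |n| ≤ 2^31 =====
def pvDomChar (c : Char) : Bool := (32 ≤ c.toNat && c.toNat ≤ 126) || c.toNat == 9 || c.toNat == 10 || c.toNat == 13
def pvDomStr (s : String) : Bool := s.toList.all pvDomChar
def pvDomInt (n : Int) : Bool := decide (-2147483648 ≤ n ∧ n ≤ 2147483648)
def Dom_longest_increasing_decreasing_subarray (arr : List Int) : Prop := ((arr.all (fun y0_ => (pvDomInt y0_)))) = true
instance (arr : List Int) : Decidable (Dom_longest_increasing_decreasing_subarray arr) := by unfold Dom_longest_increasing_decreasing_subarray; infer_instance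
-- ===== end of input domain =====

-- B replaces A's per-step inc/dec counters by a run scanner over the sign of consecutive
-- differences (alternative decomposition, same O(n) cost and identical return values).

-- ===== PORT A =====
structure PvAState where
  maxLen : Int
  incLen : Int
  decLen : Int
  startIdx : Int
  maxStart : Int
  isInc : Bool
deriving Repr, DecidableEq

def pvStepA (arr : List Int) (st : PvAState) (i : Int) : PvAState :=
  let ai := PySem.List.pyGetD arr i 0
  let ap := PySem.List.pyGetD arr (i - 1) 0
  if ai > ap then
    let inc := st.incLen + 1
    let start := if inc = 2 then i - 1 else st.startIdx
    if inc > st.maxLen then ⟨inc, inc, 1, start, start, true⟩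
    else ⟨st.maxLen, inc, 1, start, st.maxStart, st.isInc⟩
  else if ai < ap then
    let dec := st.decLen + 1
    let start := if dec = 2 then i - 1 else st.startIdx
    if dec > st.maxLen then ⟨dec, 1, dec, start, start, false⟩
    else ⟨st.maxLen, 1, dec, start, st.maxStart, st.isInc⟩
  else ⟨st.maxLen, 1, 1, st.startIdx, st.maxStart, st.isInc⟩

def longest_increasing_decreasing_subarray (arr : List Int) : Int × List Int :=
  if arr = [] then (0, [])
  else
    let n : Int := PySem.List.len arr
    let st := (PySem.List.pyRange 1 n 1).foldl (pvStepA arr) ⟨1, 1, 1, 0, 0, true⟩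
    (st.maxLen, PySem.List.slice arr (some st.maxStart) (some (st.maxStart + st.maxLen)))

-- ===== PORT B =====
-- s = (arr[i] > arr[i-1]) - (arr[i] < arr[i-1])
def pvSignAt (arr : List Int) (i : Int) : Int :=
  (if PySem.List.pyGetD arr i 0 > PySem.List.pyGetD arr (i - 1) 0 then 1 else 0)
  - (if PySem.List.pyGetD arr i 0 < PySem.List.pyGetD arr (i - 1) 0 then 1 else 0)

-- inner while: extend j while the next difference has the same sign s
def pvRunEnd (arr : List Int) (n s j : Int) : Int :=
  if _h : j + 1 < n ∧ pvSignAt arr (j + 1) = s then pvRunEnd arr n s (j + 1) else j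
termination_by (n - j).toNat
decreasing_by omega

lemma pvRunEnd_ge (arr : List Int) (n s : Int) : ∀ j, j ≤ pvRunEnd arr n s j := by
  intro j
  induction j using pvRunEnd.induct (arr := arr) (n := n) (s := s) with
  | case1 j h ih => rw [pvRunEnd, dif_pos h]; omega
  | case2 j h => rw [pvRunEnd, dif_neg h]

-- outer while over i, jumping to the end of each nonzero-sign run
def pvScan (arr : List Int) (n i bestLen bestStart : Int) : Int × Int :=
  if _h : i < n then
    let s := pvSignAt arr i
    if s = 0 then pvScan arr n (i + 1) bestLen bestStart
    else
      let j := pvRunEnd arr n s i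
      let runLen := j - i + 2
      if runLen > bestLen then pvScan arr n (j + 1) runLen (i - 1)
      else pvScan arr n (j + 1) bestLen bestStart
  else (bestLen, bestStart)
termination_by (n - i).toNat
decreasing_by
  · omega
  · have := pvRunEnd_ge arr n (pvSignAt arr i) i; omega
  · have := pvRunEnd_ge arr n (pvSignAt arr i) i; omega

def longest_increasing_decreasing_subarray_alt (arr : List Int) : Int × List Int :=
  if arr = [] then (0, [])
  else
    let n : Int := PySem.List.len arr
    let bb := pvScan arr n 1 1 0
    (bb.1, PySem.List.slice arr (some bb.2) (some (bb.2 + bb.1)))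

-- ===== PRECONDITION & SPEC =====
def Spec_longest_increasing_decreasing_subarray (arr : List Int) (out : Int × List Int) : Prop := out = longest_increasing_decreasing_subarray_alt arr
instance (arr : List Int) (out : Int × List Int) : Decidable (Spec_longest_increasing_decreasing_subarray arr out) := by unfold Spec_longest_increasing_decreasing_subarray; infer_instance

-- ===== CLAIM (what is proved, stated in full; the proofs are below) =====
def Claim_equal_longest_increasing_decreasing_subarray : Prop := ∀ (arr : List Int), Dom_longest_increasing_decreasing_subarray arr → Spec_longest_increasing_decreasing_subarray arr (longest_increasing_decreasing_subarray arr)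

-- ===== LEMMAS AND PROOFS =====

lemma pvSign_one {arr : List Int} {i : Int} (h : pvSignAt arr i = 1) :
    PySem.List.pyGetD arr i 0 > PySem.List.pyGetD arr (i - 1) 0 := by
  unfold pvSignAt at h; split_ifs at h with h1 h2 <;> first | assumption | omega

lemma pvSign_neg_one {arr : List Int} {i : Int} (h : pvSignAt arr i = -1) :
    PySem.List.pyGetD arr i 0 < PySem.List.pyGetD arr (i - 1) 0 := by
  unfold pvSignAt at h; split_ifs at h with h1 h2 <;> first | assumption | omega

lemma pvSign_zero {arr : List Int} {i : Int} (h : pvSignAt arr i = 0) :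
    PySem.List.pyGetD arr i 0 = PySem.List.pyGetD arr (i - 1) 0 := by
  unfold pvSignAt at h; split_ifs at h with h1 h2 <;> omega

lemma pvSign_cases (arr : List Int) (i : Int) :
    pvSignAt arr i = 1 ∨ pvSignAt arr i = -1 ∨ pvSignAt arr i = 0 := by
  unfold pvSignAt; split_ifs <;> omega

lemma pvRunEnd_spec (arr : List Int) (n s : Int) : ∀ j,
    pvRunEnd arr n s j < max n (j + 1) ∧
    (∀ t, j < t → t ≤ pvRunEnd arr n s j → pvSignAt arr t = s) ∧
    ¬ (pvRunEnd arr n s j + 1 < n ∧ pvSignAt arr (pvRunEnd arr n s j + 1) = s) := by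
  intro j
  induction j using pvRunEnd.induct (arr := arr) (n := n) (s := s) with
  | case1 j h ih =>
    rw [pvRunEnd, dif_pos h]
    refine ⟨by have := ih.1; omega, ?_, ih.2.2⟩
    intro t ht1 ht2
    rcases eq_or_lt_of_le (show j + 1 ≤ t by omega) with he | hl
    · rw [← he]; exact h.2
    · exact ih.2.1 t hl ht2
  | case2 j h =>
    rw [pvRunEnd, dif_neg h]
    exact ⟨by omega, by intro t h1 h2; omega, h⟩

-- folding A's step over a run of +1 signs
lemma pvRunInc : ∀ (m : Nat) (arr : List Int) (k M c stIdx MS : Int) (b : Bool),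
    (∀ t, k ≤ t → t < k + m → pvSignAt arr t = 1) → 2 ≤ c → c ≤ M →
    (PySem.List.pyRange k (k + m) 1).foldl (pvStepA arr) ⟨M, c, 1, stIdx, MS, b⟩ =
      ⟨max M (c + m), c + m, 1, stIdx, if c + m > M then stIdx else MS,
        if c + m > M then true else b⟩ := by
  intro m
  induction m with
  | zero =>
    intro arr k M c stIdx MS b _ hc hM
    simp only [Nat.cast_zero, add_zero]
    rw [PySem.List.pyRange_one_eq_nil (le_refl k), List.foldl_nil]
    have h1 : ¬ c > M := by omega
    rw [max_eq_left hM, if_neg h1, if_neg h1]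
  | succ m ih =>
    intro arr k M c stIdx MS b hs hc hM
    rw [PySem.List.pyRange_one_cons (by omega : k < k + (m + 1 : Nat)), List.foldl_cons]
    have hsk : pvSignAt arr k = 1 := hs k (le_refl k) (by omega)
    have hgt := pvSign_one hsk
    have hstep : pvStepA arr ⟨M, c, 1, stIdx, MS, b⟩ k =
        if c + 1 > M then ⟨c + 1, c + 1, 1, stIdx, stIdx, true⟩
        else ⟨M, c + 1, 1, stIdx, MS, b⟩ := by
      unfold pvStepA; simp only [if_pos hgt]
      rw [if_neg (by omega : ¬ c + 1 = 2)]
    rw [hstep]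
    have hrange : k + (m + 1 : Nat) = (k + 1) + (m : Nat) := by push_cast; ring
    have hs' : ∀ t, k + 1 ≤ t → t < (k + 1) + m → pvSignAt arr t = 1 := by
      intro t h1 h2; exact hs t (by omega) (by omega)
    by_cases hM1 : c + 1 > M
    · rw [if_pos hM1, hrange, ih arr (k + 1) (c + 1) (c + 1) stIdx stIdx true hs' (by omega) (le_refl _)]
      have : max (c + 1) (c + 1 + m) = max M (c + (m + 1 : Nat)) := by push_cast; omega
      rw [this]
      have h2 : c + (m + 1 : Nat) > M := by push_cast; omega
      rw [if_pos h2]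
      congr 1 <;> first
        | rfl
        | (push_cast; omega)
        | (push_cast; split_ifs <;> first | rfl | omega)
    · rw [if_neg hM1, hrange, ih arr (k + 1) M (c + 1) stIdx MS b hs' (by omega) (by omega)]
      congr 1 <;> first
        | rfl
        | (push_cast; omega)
        | (push_cast; split_ifs <;> first | rfl | omega)

-- folding A's step over a run of -1 signs
lemma pvRunDec : ∀ (m : Nat) (arr : List Int) (k M c stIdx MS : Int) (b : Bool),
    (∀ t, k ≤ t → t < k + m → pvSignAt arr t = -1) → 2 ≤ c → c ≤ M →
    (PySem.List.pyRange k (k + m) 1).foldl (pvStepA arr) ⟨M, 1, c, stIdx, MS, b⟩ =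
      ⟨max M (c + m), 1, c + m, stIdx, if c + m > M then stIdx else MS,
        if c + m > M then false else b⟩ := by
  intro m
  induction m with
  | zero =>
    intro arr k M c stIdx MS b _ hc hM
    simp only [Nat.cast_zero, add_zero]
    rw [PySem.List.pyRange_one_eq_nil (le_refl k), List.foldl_nil]
    have h1 : ¬ c > M := by omega
    rw [max_eq_left hM, if_neg h1, if_neg h1]
  | succ m ih =>
    intro arr k M c stIdx MS b hs hc hM
    rw [PySem.List.pyRange_one_cons (by omega : k < k + (m + 1 : Nat)), List.foldl_cons]
    have hsk : pvSignAt arr k = -1 := hs k (le_refl k) (by omega)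
    have hlt := pvSign_neg_one hsk
    have hstep : pvStepA arr ⟨M, 1, c, stIdx, MS, b⟩ k =
        if c + 1 > M then ⟨c + 1, 1, c + 1, stIdx, stIdx, false⟩
        else ⟨M, 1, c + 1, stIdx, MS, b⟩ := by
      unfold pvStepA; simp only [if_neg (by omega : ¬ PySem.List.pyGetD arr k 0 > PySem.List.pyGetD arr (k - 1) 0), if_pos hlt]
      rw [if_neg (by omega : ¬ c + 1 = 2)]
    rw [hstep]
    have hrange : k + (m + 1 : Nat) = (k + 1) + (m : Nat) := by push_cast; ring
    have hs' : ∀ t, k + 1 ≤ t → t < (k + 1) + m → pvSignAt arr t = -1 := by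
      intro t h1 h2; exact hs t (by omega) (by omega)
    by_cases hM1 : c + 1 > M
    · rw [if_pos hM1, hrange, ih arr (k + 1) (c + 1) (c + 1) stIdx stIdx false hs' (by omega) (le_refl _)]
      have : max (c + 1) (c + 1 + m) = max M (c + (m + 1 : Nat)) := by push_cast; omega
      rw [this]
      have h2 : c + (m + 1 : Nat) > M := by push_cast; omega
      rw [if_pos h2]
      congr 1 <;> first
        | rfl
        | (push_cast; omega)
        | (push_cast; split_ifs <;> first | rfl | omega)
    · rw [if_neg hM1, hrange, ih arr (k + 1) M (c + 1) stIdx MS b hs' (by omega) (by omega)]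
      congr 1 <;> first
        | rfl
        | (push_cast; omega)
        | (push_cast; split_ifs <;> first | rfl | omega)

-- the main correspondence: A's fold from i onward computes exactly B's scan
lemma pvScan_eq (arr : List Int) (n : Int) : ∀ (fuel : Nat) (i : Int) (st : PvAState),
    (n - i).toNat ≤ fuel → 1 ≤ st.maxLen →
    (i < n → (pvSignAt arr i = 1 → st.incLen = 1) ∧ (pvSignAt arr i = -1 → st.decLen = 1)) →
    (((PySem.List.pyRange i n 1).foldl (pvStepA arr) st).maxLen,
     ((PySem.List.pyRange i n 1).foldl (pvStepA arr) st).maxStart) =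
      pvScan arr n i st.maxLen st.maxStart := by
  intro fuel
  induction fuel with
  | zero =>
    intro i st hf _ _
    have hin : n ≤ i := by omega
    rw [PySem.List.pyRange_one_eq_nil hin, pvScan, dif_neg (by omega)]
    rfl
  | succ fuel ih =>
    intro i st hf hM hcond
    by_cases hin : i < n
    case neg =>
      rw [PySem.List.pyRange_one_eq_nil (by omega), pvScan, dif_neg hin]; rfl
    rw [pvScan, dif_pos hin]
    rcases pvSign_cases arr i with hs | hs | hs
    · -- increasing run starting at i
      simp only [hs, if_neg (by omega : ¬ (1:Int) = 0)]
      obtain ⟨hj1, hj2, hj3⟩ := pvRunEnd_spec arr n 1 i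
      set j := pvRunEnd arr n 1 i with hjdef
      have hji : i ≤ j := pvRunEnd_ge arr n 1 i
      have hjn : j < n := by omega
      -- split the range at i and at j+1
      rw [PySem.List.pyRange_one_cons hin,
          PySem.List.pyRange_one_append (i + 1) (j + 1) n (by omega) (by omega),
          List.foldl_cons, List.foldl_append]
      have hgt := pvSign_one hs
      have hinc1 : st.incLen = 1 := (hcond hin).1 hs
      have hstep : pvStepA arr st i =
          if 2 > st.maxLen then ⟨2, 2, 1, i - 1, i - 1, true⟩
          else ⟨st.maxLen, 2, 1, i - 1, st.maxStart, st.isInc⟩ := by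
        unfold pvStepA
        simp only [if_pos hgt, hinc1]
        norm_num
      set m : Nat := (j - i).toNat with hmdef
      have hjm : j + 1 = (i + 1) + (m : Int) := by omega
      have hsrun : ∀ t, i + 1 ≤ t → t < (i + 1) + (m : Int) → pvSignAt arr t = 1 := by
        intro t h1 h2; exact hj2 t (by omega) (by omega)
      have hMS : ∀ (M MS : Int) (b : Bool), 2 ≤ M →
          (PySem.List.pyRange (i + 1) (j + 1) 1).foldl (pvStepA arr) ⟨M, 2, 1, i - 1, MS, b⟩ =
          ⟨max M (2 + m), 2 + m, 1, i - 1, if 2 + m > M then i - 1 else MS,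
            if 2 + m > M then true else b⟩ := by
        intro M MS b h2M
        rw [hjm]
        exact pvRunInc m arr (i + 1) M 2 (i - 1) MS b hsrun (le_refl 2) h2M
      rw [hstep]
      have hrunLen : j - i + 2 = 2 + (m : Int) := by omega
      -- resulting state after the whole run
      have hfin : (PySem.List.pyRange (i + 1) (j + 1) 1).foldl (pvStepA arr)
            (if 2 > st.maxLen then ⟨2, 2, 1, i - 1, i - 1, true⟩
             else ⟨st.maxLen, 2, 1, i - 1, st.maxStart, st.isInc⟩) =
          ⟨if j - i + 2 > st.maxLen then j - i + 2 else st.maxLen, 2 + m, 1, i - 1,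
           if j - i + 2 > st.maxLen then i - 1 else st.maxStart,
           if j - i + 2 > st.maxLen then true else st.isInc⟩ := by
        by_cases h1 : 2 > st.maxLen
        · rw [if_pos h1, hMS 2 (i - 1) true (le_refl 2)]
          congr 1 <;> first
            | rfl
            | (push_cast; omega)
            | (push_cast; split_ifs <;> first | rfl | omega)
        · rw [if_neg h1, hMS st.maxLen st.maxStart st.isInc (by omega)]
          congr 1 <;> first
            | rfl
            | (push_cast; omega)
            | (push_cast; split_ifs <;> first | rfl | omega)
      rw [hfin]
      -- continue after the run via the IH
      have hcont := ih (j + 1)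
        ⟨if j - i + 2 > st.maxLen then j - i + 2 else st.maxLen, 2 + m, 1, i - 1,
         if j - i + 2 > st.maxLen then i - 1 else st.maxStart,
         if j - i + 2 > st.maxLen then true else st.isInc⟩
        (by omega) (by simp only; split_ifs <;> omega)
        (by
          intro hlt
          constructor
          · intro hsig; exact absurd ⟨hlt, hsig⟩ hj3
          · intro _; rfl)
      simp only at hcont
      rw [hcont]
      split_ifs with u <;> rfl
    · -- decreasing run starting at i
      simp only [hs, if_neg (by omega : ¬ (-1:Int) = 0)]
      obtain ⟨hj1, hj2, hj3⟩ := pvRunEnd_spec arr n (-1) i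
      set j := pvRunEnd arr n (-1) i with hjdef
      have hji : i ≤ j := pvRunEnd_ge arr n (-1) i
      have hjn : j < n := by omega
      rw [PySem.List.pyRange_one_cons hin,
          PySem.List.pyRange_one_append (i + 1) (j + 1) n (by omega) (by omega),
          List.foldl_cons, List.foldl_append]
      have hlt := pvSign_neg_one hs
      have hdec1 : st.decLen = 1 := (hcond hin).2 hs
      have hstep : pvStepA arr st i =
          if 2 > st.maxLen then ⟨2, 1, 2, i - 1, i - 1, false⟩
          else ⟨st.maxLen, 1, 2, i - 1, st.maxStart, st.isInc⟩ := by
        unfold pvStepA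
        simp only [if_neg (by omega : ¬ PySem.List.pyGetD arr i 0 > PySem.List.pyGetD arr (i - 1) 0),
          if_pos hlt, hdec1]
        norm_num
      set m : Nat := (j - i).toNat with hmdef
      have hjm : j + 1 = (i + 1) + (m : Int) := by omega
      have hsrun : ∀ t, i + 1 ≤ t → t < (i + 1) + (m : Int) → pvSignAt arr t = -1 := by
        intro t h1 h2; exact hj2 t (by omega) (by omega)
      have hMS : ∀ (M MS : Int) (b : Bool), 2 ≤ M →
          (PySem.List.pyRange (i + 1) (j + 1) 1).foldl (pvStepA arr) ⟨M, 1, 2, i - 1, MS, b⟩ =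
          ⟨max M (2 + m), 1, 2 + m, i - 1, if 2 + m > M then i - 1 else MS,
            if 2 + m > M then false else b⟩ := by
        intro M MS b h2M
        rw [hjm]
        exact pvRunDec m arr (i + 1) M 2 (i - 1) MS b hsrun (le_refl 2) h2M
      rw [hstep]
      have hfin : (PySem.List.pyRange (i + 1) (j + 1) 1).foldl (pvStepA arr)
            (if 2 > st.maxLen then ⟨2, 1, 2, i - 1, i - 1, false⟩
             else ⟨st.maxLen, 1, 2, i - 1, st.maxStart, st.isInc⟩) =
          ⟨if j - i + 2 > st.maxLen then j - i + 2 else st.maxLen, 1, 2 + m, i - 1,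
           if j - i + 2 > st.maxLen then i - 1 else st.maxStart,
           if j - i + 2 > st.maxLen then false else st.isInc⟩ := by
        by_cases h1 : 2 > st.maxLen
        · rw [if_pos h1, hMS 2 (i - 1) false (le_refl 2)]
          congr 1 <;> first
            | rfl
            | (push_cast; omega)
            | (push_cast; split_ifs <;> first | rfl | omega)
        · rw [if_neg h1, hMS st.maxLen st.maxStart st.isInc (by omega)]
          congr 1 <;> first
            | rfl
            | (push_cast; omega)
            | (push_cast; split_ifs <;> first | rfl | omega)
      rw [hfin]
      have hcont := ih (j + 1)
        ⟨if j - i + 2 > st.maxLen then j - i + 2 else st.maxLen, 1, 2 + m, i - 1,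
         if j - i + 2 > st.maxLen then i - 1 else st.maxStart,
         if j - i + 2 > st.maxLen then false else st.isInc⟩
        (by omega) (by simp only; split_ifs <;> omega)
        (by
          intro hlt'
          constructor
          · intro _; rfl
          · intro hsig; exact absurd ⟨hlt', hsig⟩ hj3)
      simp only at hcont
      rw [hcont]
      split_ifs with u <;> rfl
    · -- equal neighbours: both counters reset, B skips
      simp only [hs]
      have heq := pvSign_zero hs
      have hstep : pvStepA arr st i = ⟨st.maxLen, 1, 1, st.startIdx, st.maxStart, st.isInc⟩ := by
        unfold pvStepA
        rw [if_neg (by omega), if_neg (by omega)]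
      rw [PySem.List.pyRange_one_cons hin, List.foldl_cons, hstep]
      have hcont := ih (i + 1) ⟨st.maxLen, 1, 1, st.startIdx, st.maxStart, st.isInc⟩
        (by omega) (by simpa using hM)
        (by intro _; exact ⟨fun _ => rfl, fun _ => rfl⟩)
      simpa using hcont

-- ===== VERDICT (by name: the statement is the Claim_ definition above) =====
theorem longest_increasing_decreasing_subarray_spec : Claim_equal_longest_increasing_decreasing_subarray := by
  intro arr _
  unfold Spec_longest_increasing_decreasing_subarray
  unfold longest_increasing_decreasing_subarray longest_increasing_decreasing_subarray_alt
  by_cases h : arr = []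
  · simp [h]
  · rw [if_neg h, if_neg h]
    have hmain := pvScan_eq arr (PySem.List.len arr) ((PySem.List.len arr - 1).toNat) 1
      ⟨1, 1, 1, 0, 0, true⟩ (by omega) (by norm_num)
      (by intro _; exact ⟨fun _ => rfl, fun _ => rfl⟩)
    have h1 := congrArg Prod.fst hmain
    have h2 := congrArg Prod.snd hmain
    simp only at h1 h2
    dsimp only
    rw [h1, h2]
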